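-- pv_equiv track=rewrite | github.com/wangguangyuabc/WGY_LOVE_LZQ | game/rule.py | get_legal_move
-- ===== SOURCE A (Python) =====
-- def get_legal_move(situation, legal_chess, player):
--     legal_move = []
--     for chess in legal_chess.copy():
--         if player == -1:
--             chess = -chess
--         for i in range(5):
--             for j in range(5):
--                 if situation[i][j] == chess:
--                     if player == 1:  # 假如目前玩家是红色
--                         if i < 4:
--                             legal_move.append(str(abs(chess)) + '下')
--                         if j < 4:
--                             legal_move.append(str(abs(chess)) + '右')
--                         if i < 4 and j < 4:
--                             legal_move.append(str(abs(chess)) + '右下')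
--                     if player == -1:  # 假如目前玩家是蓝色
--                         if i > 0:
--                             legal_move.append(str(abs(chess)) + '上')
--                         if j > 0:
--                             legal_move.append(str(abs(chess)) + '左')
--                         if i > 0 and j > 0:
--                             legal_move.append(str(abs(chess)) + '左上')
--     return legal_move
-- ===== SOURCE B (Python) =====
-- def get_legal_move(situation, legal_chess, player):
--     # One pass over the 5x5 board grouping cell positions by value, then a
--     # lookup per piece instead of a fresh 5x5 scan per piece.
--     cells = [(situation[i][j], (i, j)) for i in range(5) for j in range(5)]
--     positions = {}
--     for v, pos in cells:
--         positions[v] = positions.get(v, []) + [pos]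
--     legal_move = []
--     for chess in legal_chess:
--         key = -chess if player == -1 else chess
--         name = str(abs(chess))
--         for i, j in positions.get(key, []):
--             if player == 1:
--                 if i < 4:
--                     legal_move.append(name + '下')
--                 if j < 4:
--                     legal_move.append(name + '右')
--                 if i < 4 and j < 4:
--                     legal_move.append(name + '右下')
--             elif player == -1:
--                 if i > 0:
--                     legal_move.append(name + '上')
--                 if j > 0:
--                     legal_move.append(name + '左')
--                 if i > 0 and j > 0:
--                     legal_move.append(name + '左上')
--     return legal_move
-- ===== Notes on version B (the rewrite author's own statement) =====
-- stated objective: alternative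
-- what changed: B scans the 5x5 board once to build a dict mapping each cell value to its row-major position list, then answers each piece in legal_chess by a single dict lookup instead of re-scanning the whole board per piece.
-- outside the precondition, e.g. on get_legal_move([], [], 0): A returns [], B raises IndexError
import Mathlib
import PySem

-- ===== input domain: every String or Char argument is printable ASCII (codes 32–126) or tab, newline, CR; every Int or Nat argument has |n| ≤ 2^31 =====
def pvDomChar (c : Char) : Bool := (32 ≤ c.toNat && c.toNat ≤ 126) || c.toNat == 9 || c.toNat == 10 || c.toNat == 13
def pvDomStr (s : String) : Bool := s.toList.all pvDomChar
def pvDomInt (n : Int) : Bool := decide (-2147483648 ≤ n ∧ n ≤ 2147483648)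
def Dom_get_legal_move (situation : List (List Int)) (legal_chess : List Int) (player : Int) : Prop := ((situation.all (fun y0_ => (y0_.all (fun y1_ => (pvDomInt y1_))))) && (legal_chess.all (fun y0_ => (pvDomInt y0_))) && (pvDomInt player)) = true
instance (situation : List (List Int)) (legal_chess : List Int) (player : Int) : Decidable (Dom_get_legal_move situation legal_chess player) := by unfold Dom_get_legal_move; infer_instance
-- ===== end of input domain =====

-- B groups the 25 board cells by value in one pass (a dict value → row-major position list),
-- then answers each piece of legal_chess by a single lookup instead of a fresh 5x5 scan.

-- situation[i][j]; total form of the indexing both Pythons perform (exact under Pre_, where both indices are in range)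
def pvCell (situation : List (List Int)) (i j : Int) : Int :=
  PySem.List.pyGetD (PySem.List.pyGetD situation i []) j 0

-- ===== PORT A =====
def get_legal_move (situation : List (List Int)) (legal_chess : List Int) (player : Int) : List String :=
  legal_chess.foldl (fun legal_move chess0 =>
    let chess := if player = -1 then -chess0 else chess0
    (PySem.List.pyRange 0 5 1).foldl (fun legal_move i =>
      (PySem.List.pyRange 0 5 1).foldl (fun legal_move j =>
        if pvCell situation i j = chess then
          let lm1 :=
            if player = 1 then
              let a := if i < 4 then legal_move ++ [PySem.Int.toStr |chess| ++ "下"] else legal_move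
              let a := if j < 4 then a ++ [PySem.Int.toStr |chess| ++ "右"] else a
              if i < 4 ∧ j < 4 then a ++ [PySem.Int.toStr |chess| ++ "右下"] else a
            else legal_move
          if player = -1 then
            let a := if 0 < i then lm1 ++ [PySem.Int.toStr |chess| ++ "上"] else lm1
            let a := if 0 < j then a ++ [PySem.Int.toStr |chess| ++ "左"] else a
            if 0 < i ∧ 0 < j then a ++ [PySem.Int.toStr |chess| ++ "左上"] else a
          else lm1
        else legal_move) legal_move) legal_move) []

-- ===== PORT B =====
-- cells = [(situation[i][j], (i, j)) for i in range(5) for j in range(5)]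
def pvCells (situation : List (List Int)) : List (Int × Int × Int) :=
  (PySem.List.pyRange 0 5 1).flatMap (fun i =>
    (PySem.List.pyRange 0 5 1).map (fun j => (pvCell situation i j, i, j)))

-- positions[v] = positions.get(v, []) + [pos]
def pvPositions (situation : List (List Int)) : PySem.Dict Int (List (Int × Int)) :=
  (pvCells situation).foldl (fun d p => d.modify p.1 [] (· ++ [p.2])) PySem.Dict.empty

def get_legal_move_alt (situation : List (List Int)) (legal_chess : List Int) (player : Int) : List String :=
  let positions := pvPositions situation
  legal_chess.foldl (fun legal_move chess =>
    let key := if player = -1 then -chess else chess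
    let name := PySem.Int.toStr |chess|
    (positions.getD key []).foldl (fun legal_move ij =>
      if player = 1 then
        let a := if ij.1 < 4 then legal_move ++ [name ++ "下"] else legal_move
        let a := if ij.2 < 4 then a ++ [name ++ "右"] else a
        if ij.1 < 4 ∧ ij.2 < 4 then a ++ [name ++ "右下"] else a
      else if player = -1 then
        let a := if 0 < ij.1 then legal_move ++ [name ++ "上"] else legal_move
        let a := if 0 < ij.2 then a ++ [name ++ "左"] else a
        if 0 < ij.1 ∧ 0 < ij.2 then a ++ [name ++ "左上"] else a
      else legal_move) legal_move) []

-- ===== PRECONDITION & SPEC =====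
-- Pre_ excludes boards smaller than 5x5: B's one unconditional scan indexes situation[i][j]
-- for all 0 ≤ i,j < 5 and raises IndexError there, and A does too whenever legal_chess is
-- non-empty (with legal_chess empty A happens to return [] on a short board, which B cannot).
def Pre_get_legal_move (situation : List (List Int)) (legal_chess : List Int) (player : Int) : Prop :=
  5 ≤ situation.length ∧ ∀ r ∈ situation.take 5, 5 ≤ r.length
instance (situation : List (List Int)) (legal_chess : List Int) (player : Int) : Decidable (Pre_get_legal_move situation legal_chess player) := by unfold Pre_get_legal_move; infer_instance

def pvWitness_get_legal_move : List (List Int) × List Int × Int :=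
  ([[1,2,3,4,5],[0,0,0,0,0],[0,0,0,0,0],[0,0,0,0,0],[-1,-2,-3,-4,-5]], [1, 2], 1)

def Spec_get_legal_move (situation : List (List Int)) (legal_chess : List Int) (player : Int) (out : List String) : Prop := out = get_legal_move_alt situation legal_chess player
instance (situation : List (List Int)) (legal_chess : List Int) (player : Int) (out : List String) : Decidable (Spec_get_legal_move situation legal_chess player out) := by unfold Spec_get_legal_move; infer_instance

-- ===== CLAIM (what is proved, stated in full; the proofs are below) =====
def Claim_equal_get_legal_move : Prop := ∀ (situation : List (List Int)) (legal_chess : List Int) (player : Int), Dom_get_legal_move situation legal_chess player → Pre_get_legal_move situation legal_chess player → Spec_get_legal_move situation legal_chess player (get_legal_move situation legal_chess player)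

-- ===== LEMMAS AND PROOFS =====

-- the three move strings one occupied cell contributes, in emission order
def pvEmit (player : Int) (name : String) (i j : Int) : List String :=
  (if player = 1 then
      (if i < 4 then [name ++ "下"] else []) ++ (if j < 4 then [name ++ "右"] else []) ++
      (if i < 4 ∧ j < 4 then [name ++ "右下"] else [])
   else []) ++
  (if player = -1 then
      (if 0 < i then [name ++ "上"] else []) ++ (if 0 < j then [name ++ "左"] else []) ++
      (if 0 < i ∧ 0 < j then [name ++ "左上"] else [])
   else [])

theorem pv_foldl_guard {κ ν β : Type} [DecidableEq κ] (l : List (κ × ν)) (key : κ)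
    (f : ν → List β) (acc : List β) :
    l.foldl (fun a p => if p.1 = key then a ++ f p.2 else a) acc
      = acc ++ ((l.filter (fun p => p.1 = key)).map (·.2)).flatMap f := by
  induction l generalizing acc with
  | nil => simp
  | cons p ps ih =>
    by_cases h : p.1 = key <;> simp [List.foldl_cons, h, ih]

theorem pv_foldl_flatMap {α β γ : Type} (l : List α) (f : α → List β) (g : γ → β → γ) (init : γ) :
    (l.flatMap f).foldl g init = l.foldl (fun a x => (f x).foldl g a) init := by
  induction l generalizing init with
  | nil => simp
  | cons x xs ih => simp [List.foldl_append, ih]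

theorem pv_abs_key (player chess : Int) : |if player = -1 then -chess else chess| = |chess| := by
  split <;> simp

-- A's per-cell emission block equals appending pvEmit
theorem pv_bodyA (player chess : Int) (legal_move : List String) (i j : Int) :
    (let lm1 :=
        if player = 1 then
          let a := if i < 4 then legal_move ++ [PySem.Int.toStr |chess| ++ "下"] else legal_move
          let a := if j < 4 then a ++ [PySem.Int.toStr |chess| ++ "右"] else a
          if i < 4 ∧ j < 4 then a ++ [PySem.Int.toStr |chess| ++ "右下"] else a
        else legal_move
      if player = -1 then
        let a := if 0 < i then lm1 ++ [PySem.Int.toStr |chess| ++ "上"] else lm1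
        let a := if 0 < j then a ++ [PySem.Int.toStr |chess| ++ "左"] else a
        if 0 < i ∧ 0 < j then a ++ [PySem.Int.toStr |chess| ++ "左上"] else a
      else lm1)
    = legal_move ++ pvEmit player (PySem.Int.toStr |chess|) i j := by
  rcases eq_or_ne player 1 with hp1 | hp1 <;> rcases eq_or_ne player (-1) with hpm | hpm
  · omega
  all_goals
    by_cases hi : i < 4 <;> by_cases hj : j < 4 <;> by_cases hi0 : 0 < i <;> by_cases hj0 : 0 < j <;>
      simp [pvEmit, hp1, hpm, hi, hj, hi0, hj0]

-- B's per-cell emission block equals appending pvEmit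
theorem pv_bodyB (player : Int) (name : String) (legal_move : List String) (i j : Int) :
    (if player = 1 then
        let a := if i < 4 then legal_move ++ [name ++ "下"] else legal_move
        let a := if j < 4 then a ++ [name ++ "右"] else a
        if i < 4 ∧ j < 4 then a ++ [name ++ "右下"] else a
      else if player = -1 then
        let a := if 0 < i then legal_move ++ [name ++ "上"] else legal_move
        let a := if 0 < j then a ++ [name ++ "左"] else a
        if 0 < i ∧ 0 < j then a ++ [name ++ "左上"] else a
      else legal_move)
    = legal_move ++ pvEmit player name i j := by
  rcases eq_or_ne player 1 with hp1 | hp1 <;> rcases eq_or_ne player (-1) with hpm | hpm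
  · omega
  all_goals
    by_cases hi : i < 4 <;> by_cases hj : j < 4 <;> by_cases hi0 : 0 < i <;> by_cases hj0 : 0 < j <;>
      simp [pvEmit, hp1, hpm, hi, hj, hi0, hj0]

-- the dict lookup in B is exactly the row-major positions of cells holding key
theorem pv_positions_getD (situation : List (List Int)) (key : Int) :
    (pvPositions situation).getD key []
      = ((pvCells situation).filter (fun p => p.1 = key)).map (·.2) := by
  unfold pvPositions
  rw [PySem.Dict.getD_foldl_modify_append]
  simp only [PySem.Dict.getD_empty, List.nil_append]
  congr 1

-- A's per-chess double scan produces acc ++ the flatMap of pvEmit over the matching positions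
theorem pv_A_inner (situation : List (List Int)) (player chess : Int) (acc : List String) :
    (PySem.List.pyRange 0 5 1).foldl (fun legal_move i =>
      (PySem.List.pyRange 0 5 1).foldl (fun legal_move j =>
        if pvCell situation i j = chess then
          let lm1 :=
            if player = 1 then
              let a := if i < 4 then legal_move ++ [PySem.Int.toStr |chess| ++ "下"] else legal_move
              let a := if j < 4 then a ++ [PySem.Int.toStr |chess| ++ "右"] else a
              if i < 4 ∧ j < 4 then a ++ [PySem.Int.toStr |chess| ++ "右下"] else a
            else legal_move
          if player = -1 then
            let a := if 0 < i then lm1 ++ [PySem.Int.toStr |chess| ++ "上"] else lm1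
            let a := if 0 < j then a ++ [PySem.Int.toStr |chess| ++ "左"] else a
            if 0 < i ∧ 0 < j then a ++ [PySem.Int.toStr |chess| ++ "左上"] else a
          else lm1
        else legal_move) legal_move) acc
      = acc ++ (((pvCells situation).filter (fun p => p.1 = chess)).map (·.2)).flatMap
          (fun ij => pvEmit player (PySem.Int.toStr |chess|) ij.1 ij.2) := by
  rw [← pv_foldl_guard]
  unfold pvCells
  rw [pv_foldl_flatMap]
  apply PySem.List.foldl_congr_mem
  intro a i _
  rw [List.foldl_map]
  apply PySem.List.foldl_congr_mem
  intro a' j _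
  by_cases hc : pvCell situation i j = chess
  · simp only [hc, if_true]
    exact pv_bodyA player chess a' i j
  · simp only [hc, if_false]

-- B's per-chess position loop, as the same flatMap
theorem pv_B_inner (situation : List (List Int)) (player chess : Int) (acc : List String)
    (name : String) :
    ((pvPositions situation).getD chess []).foldl (fun legal_move ij =>
      if player = 1 then
        let a := if ij.1 < 4 then legal_move ++ [name ++ "下"] else legal_move
        let a := if ij.2 < 4 then a ++ [name ++ "右"] else a
        if ij.1 < 4 ∧ ij.2 < 4 then a ++ [name ++ "右下"] else a
      else if player = -1 then
        let a := if 0 < ij.1 then legal_move ++ [name ++ "上"] else legal_move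
        let a := if 0 < ij.2 then a ++ [name ++ "左"] else a
        if 0 < ij.1 ∧ 0 < ij.2 then a ++ [name ++ "左上"] else a
      else legal_move) acc
      = acc ++ (((pvCells situation).filter (fun p => p.1 = chess)).map (·.2)).flatMap
          (fun ij => pvEmit player name ij.1 ij.2) := by
  rw [pv_positions_getD, ← PySem.List.foldl_append_eq_flatMap]
  apply PySem.List.foldl_congr_mem
  intro a ij _
  exact pv_bodyB player name a ij.1 ij.2

-- ===== VERDICT (by name: the statement is the Claim_ definition above) =====
theorem get_legal_move_spec : Claim_equal_get_legal_move := by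
  intro situation legal_chess player _ _
  unfold Spec_get_legal_move get_legal_move get_legal_move_alt
  apply PySem.List.foldl_congr_mem
  intro acc chess _
  simp only
  rw [pv_A_inner, pv_B_inner, pv_abs_key]
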